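-- pv_equiv track=rewrite | github.com/pypi-data/pypi-mirror-61 | packages/topoly/topoly-0.4.0-cp35-cp35m-manylinux2010_x86_64.whl/topoly/manipulation.py | check_close
-- ===== SOURCE A (Python) =====
-- def check_close(arcs):
--     # checking if the structure has any tail, i.e. the vertex of valency < 2
--     ends = {}
--     for arc in arcs:
--         if arc[0] not in ends.keys():
--             ends[arc[0]] = 0
--         if arc[-1] not in ends.keys():
--             ends[arc[-1]] = 0
--         ends[arc[0]] += 1
--         ends[arc[-1]] += 1
--     for key in ends.keys():
--         if ends[key] < 2:
--             return False
--     return True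
-- ===== SOURCE B (Python) =====
-- def check_close(arcs):
--     # sort all arc endpoints; closed iff every value forms a run of length >= 2
--     ends = sorted(v for arc in arcs for v in (arc[0], arc[-1]))
--     while ends:
--         v = ends[0]
--         rest = ends[1:]
--         k = 0
--         while k < len(rest) and rest[k] == v:
--             k += 1
--         if k == 0:
--             return False
--         ends = rest[k:]
--     return True
-- ===== Notes on version B (the rewrite author's own statement) =====
-- stated objective: alternative
-- what changed: Replaces A's endpoint-count dictionary plus a verification loop over its keys by a sort-then-scan: flatten all endpoints, sort them, and consume the sorted list run by run, failing on any run of length 1.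
import Mathlib
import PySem

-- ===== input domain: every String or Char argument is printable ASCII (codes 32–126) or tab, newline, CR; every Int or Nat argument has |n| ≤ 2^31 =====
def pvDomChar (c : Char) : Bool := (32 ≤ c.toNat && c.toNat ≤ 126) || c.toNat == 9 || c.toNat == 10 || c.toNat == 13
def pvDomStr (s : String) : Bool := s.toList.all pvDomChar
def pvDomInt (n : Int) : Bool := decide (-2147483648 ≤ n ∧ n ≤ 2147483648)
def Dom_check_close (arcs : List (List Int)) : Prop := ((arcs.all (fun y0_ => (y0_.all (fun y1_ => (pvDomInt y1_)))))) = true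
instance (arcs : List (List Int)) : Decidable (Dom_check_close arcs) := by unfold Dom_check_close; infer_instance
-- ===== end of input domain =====

-- B replaces A's endpoint-count dictionary plus key-verification loop by a sort-then-scan over all endpoints (fail on any run of length 1); alternative.

-- ===== PORT A =====
-- A's loop body: insert 0 for unseen endpoints, then increment both endpoint counts
def stepA (ends : PySem.Dict Int Int) (arc : List Int) : PySem.Dict Int Int :=
  match PySem.List.pyGet? arc 0, PySem.List.pyGet? arc (-1) with
  | some a0, some a1 =>
      let e1 := if (ends.get? a0).isNone then ends.insert a0 0 else ends
      let e2 := if (e1.get? a1).isNone then e1.insert a1 0 else e1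
      let e3 := e2.modify a0 0 (· + 1)
      e3.modify a1 0 (· + 1)
  | _, _ => ends   -- arc == []: Python raises IndexError (outside Pre_)

-- A's second loop: early return False on a vertex of valency < 2
def checkKeysA (ends : PySem.Dict Int Int) : List Int → Bool
  | [] => true
  | k :: ks => if ends.getD k 0 < 2 then false else checkKeysA ends ks

def check_close (arcs : List (List Int)) : Bool :=
  let ends := arcs.foldl stepA PySem.Dict.empty
  checkKeysA ends ends.keys

-- ===== PORT B =====
-- B's generator: both endpoints of every arc, in order
def endpointsB (arcs : List (List Int)) : List Int :=
  arcs.flatMap (fun arc =>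
    match PySem.List.pyGet? arc 0, PySem.List.pyGet? arc (-1) with
    | some a0, some a1 => [a0, a1]
    | _, _ => [])   -- arc == []: Python raises IndexError (outside Pre_)

-- B's outer while: peel one run of the head value per iteration; the inner
-- counting while over rest is rest.takeWhile (· == v) |>.length, and
-- rest[k:] with 0 ≤ k ≤ len rest is rest.drop k (exact there)
def scanRunsB : List Int → Bool
  | [] => true
  | v :: rest =>
    let k := (rest.takeWhile (· == v)).length
    if k == 0 then false else scanRunsB (rest.drop k)
  termination_by l => l.length
  decreasing_by simp

def check_close_alt (arcs : List (List Int)) : Bool :=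
  scanRunsB (PySem.List.sorted (endpointsB arcs) (fun x => x) false)

-- ===== PRECONDITION & SPEC =====
-- Pre_ excludes inputs containing an empty arc: both A and B raise IndexError there (arc[0]).
def Pre_check_close (arcs : List (List Int)) : Prop := ∀ arc ∈ arcs, arc ≠ []
instance (arcs : List (List Int)) : Decidable (Pre_check_close arcs) := by unfold Pre_check_close; infer_instance
def pvWitness_check_close : List (List Int) := [[1, 2], [2, 3], [3, 1]]

def Spec_check_close (arcs : List (List Int)) (out : Bool) : Prop := out = check_close_alt arcs
instance (arcs : List (List Int)) (out : Bool) : Decidable (Spec_check_close arcs out) := by unfold Spec_check_close; infer_instance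

-- ===== CLAIM (what is proved, stated in full; the proofs are below) =====
def Claim_equal_check_close : Prop := ∀ (arcs : List (List Int)), Dom_check_close arcs → Pre_check_close arcs → Spec_check_close arcs (check_close arcs)

-- ===== LEMMAS AND PROOFS =====

-- invariant for A's fold: the dict holds exactly the endpoint counts so far
def InvA (ends : PySem.Dict Int Int) (E : List Int) : Prop :=
  (∀ k, ends.getD k 0 = E.count k) ∧ (∀ k, k ∈ ends.keys ↔ k ∈ E)

-- the insert-0-if-absent step of A does not change any count
theorem getD_insert0 (d : PySem.Dict Int Int) (a k : Int) :
    (if (d.get? a).isNone then d.insert a 0 else d).getD k 0 = d.getD k 0 := by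
  by_cases h : (d.get? a).isNone
  · simp only [h, if_true, PySem.Dict.getD_insert]
    split_ifs with hk
    · subst hk
      exact (PySem.Dict.getD_of_get?_eq_none d 0 (Option.isNone_iff_eq_none.1 h)).symm
    · rfl
  · simp [h]

theorem mem_keys_insert0 (d : PySem.Dict Int Int) (a k : Int) :
    k ∈ (if (d.get? a).isNone then d.insert a 0 else d).keys ↔ k = a ∨ k ∈ d.keys := by
  by_cases h : (d.get? a).isNone
  · simp [h, PySem.Dict.mem_keys_insert]
  · simp only [h]
    constructor
    · exact Or.inr
    · rintro (rfl | hk)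
      · by_contra hk
        exact h (Option.isNone_iff_eq_none.2
          ((PySem.Dict.get?_eq_none_iff_not_mem_keys d k).2 hk))
      · exact hk

-- counts after A's arc step: both endpoints bumped by one
theorem getD_stepA (ends : PySem.Dict Int Int) (a0 a1 k : Int)
    (arc : List Int)
    (h0 : PySem.List.pyGet? arc 0 = some a0) (h1 : PySem.List.pyGet? arc (-1) = some a1) :
    (stepA ends arc).getD k 0 =
      ends.getD k 0 + (if k = a0 then 1 else 0) + (if k = a1 then 1 else 0) := by
  simp only [stepA, h0, h1]
  simp only [PySem.Dict.getD_modify, getD_insert0]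
  split_ifs <;> subst_vars <;> omega

theorem mem_keys_stepA (ends : PySem.Dict Int Int) (a0 a1 k : Int)
    (arc : List Int)
    (h0 : PySem.List.pyGet? arc 0 = some a0) (h1 : PySem.List.pyGet? arc (-1) = some a1) :
    k ∈ (stepA ends arc).keys ↔ k = a0 ∨ k = a1 ∨ k ∈ ends.keys := by
  simp only [stepA, h0, h1]
  simp only [PySem.Dict.keys_modify, PySem.Dict.mem_keys_insert, mem_keys_insert0]
  tauto

-- one arc step extends the invariant by that arc's two endpoints
theorem stepA_inv (ends : PySem.Dict Int Int) (E : List Int)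
    (arc : List Int) (hne : arc ≠ []) (h : InvA ends E) :
    InvA (stepA ends arc) (E ++ endpointsB [arc]) := by
  obtain ⟨x, xs, rfl⟩ := List.exists_cons_of_ne_nil hne
  have h0 : PySem.List.pyGet? (x :: xs) 0 = some x := PySem.List.pyGet?_zero_cons x xs
  obtain ⟨a1, hL⟩ : ∃ a1, PySem.List.pyGet? (x :: xs) (-1) = some a1 := by
    rw [PySem.List.pyGet?_neg_one]
    cases hl : (x :: xs).getLast? with
    | none => exact absurd (List.getLast?_eq_none_iff.1 hl) (by simp)
    | some a => exact ⟨a, rfl⟩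
  have hE : endpointsB [x :: xs] = [x, a1] := by simp [endpointsB, h0, hL]
  obtain ⟨hc, hm⟩ := h
  constructor
  · intro k
    rw [getD_stepA ends x a1 k _ h0 hL, hE, List.count_append, hc k]
    push_cast
    simp only [List.count_cons, List.count_nil, beq_iff_eq]
    rcases eq_or_ne k x with rfl | hx <;> rcases eq_or_ne k a1 with rfl | ha <;>
      simp_all [eq_comm] <;> omega
  · intro k
    rw [mem_keys_stepA ends x a1 k _ h0 hL, hE]
    simp [hm k]
    tauto

-- the fold accumulates the endpoint counts of all arcs
theorem foldA_inv (arcs : List (List Int)) :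
    ∀ (ends : PySem.Dict Int Int) (E : List Int),
    (∀ arc ∈ arcs, arc ≠ []) → InvA ends E →
    InvA (arcs.foldl stepA ends) (E ++ endpointsB arcs) := by
  induction arcs with
  | nil => intro ends E _ h; simpa [endpointsB] using h
  | cons arc rest ih =>
    intro ends E hpre h
    have h2 := ih (stepA ends arc) (E ++ endpointsB [arc])
      (fun a ha => hpre a (by simp [ha]))
      (stepA_inv ends E arc (hpre arc (by simp)) h)
    have : endpointsB (arc :: rest) = endpointsB [arc] ++ endpointsB rest := by
      simp [endpointsB]
    simpa [this] using h2

-- A's second loop is an 'all keys have count ≥ 2' check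
theorem checkKeysA_eq (ends : PySem.Dict Int Int) (ks : List Int) :
    checkKeysA ends ks = decide (∀ k ∈ ks, 2 ≤ ends.getD k 0) := by
  induction ks with
  | nil => simp [checkKeysA]
  | cons k ks ih =>
    simp only [checkKeysA, ih]
    by_cases h : ends.getD k 0 < 2 <;> simp [h] <;> omega

-- so A computes: every endpoint occurs at least twice in the endpoint list
theorem checkA_eq (arcs : List (List Int)) (hpre : ∀ arc ∈ arcs, arc ≠ []) :
    check_close arcs = decide (∀ k ∈ endpointsB arcs, 2 ≤ (endpointsB arcs).count k) := by
  obtain ⟨hc, hm⟩ := foldA_inv arcs PySem.Dict.empty [] hpre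
    ⟨fun k => by simp [PySem.Dict.getD_empty], fun k => by simp [PySem.Dict.keys_empty]⟩
  simp only [List.nil_append] at hc hm
  unfold check_close
  rw [checkKeysA_eq]
  congr 1
  apply propext
  constructor
  · intro h k hk
    have := h k ((hm k).2 hk)
    rw [hc k] at this
    exact_mod_cast this
  · intro h k hk
    rw [hc k]
    exact_mod_cast h k ((hm k).1 hk)

-- B's scan on a sorted list: true iff every element occurs at least twice
theorem scanRunsB_eq_aux (n : Nat) : ∀ (L : List Int), L.length ≤ n → L.Pairwise (· ≤ ·) →
    scanRunsB L = decide (∀ k ∈ L, 2 ≤ L.count k) := by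
  induction n with
  | zero =>
    intro L hL _
    have : L = [] := List.eq_nil_of_length_eq_zero (Nat.le_zero.1 hL)
    subst this; simp [scanRunsB]
  | succ n ih =>
    intro L hL hs
    match L with
    | [] => simp [scanRunsB]
    | v :: rest =>
    -- split rest into the leading run of v and the tail after it
    have hsplit : rest.takeWhile (fun x => x == v) ++ rest.dropWhile (fun x => x == v) = rest :=
      List.takeWhile_append_dropWhile
    set run := rest.takeWhile (fun x => x == v) with hrundef
    set tail := rest.dropWhile (fun x => x == v) with htaildef
    have hrunv : ∀ x ∈ run, x = v := fun x hx => by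
      simpa using List.mem_takeWhile_imp hx
    have hrest : rest = run ++ tail := hsplit.symm
    have hstail : tail.Pairwise (· ≤ ·) := by
      have h2 := (List.pairwise_cons.1 hs).2
      rw [hrest] at h2
      exact (List.pairwise_append.1 h2).2.1
    -- by sortedness no v occurs past the leading run
    have hvtail : v ∉ tail := by
      intro hv
      cases ht : tail with
      | nil => rw [ht] at hv; simp at hv
      | cons a t =>
        have ha : ¬ (a == v) = true := by
          have h3 := List.head?_dropWhile_not (fun x => x == v) rest
          rw [← htaildef, ht] at h3
          simpa using h3
        have hav : a ≠ v := by simpa using ha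
        have h1 : v ≤ a := (List.pairwise_cons.1 hs).1 a (by rw [hrest, ht]; simp)
        rw [ht] at hv hstail
        rcases List.mem_cons.1 hv with hv1 | hv2
        · exact hav hv1.symm
        · exact hav (le_antisymm ((List.pairwise_cons.1 hstail).1 v hv2) h1)
    have hcount : ∀ x, (v :: rest).count x =
        (if x = v then 1 + run.length else 0) + tail.count x := by
      intro x
      rw [hrest, List.count_cons, List.count_append]
      by_cases hx : x = v
      · subst hx
        have hcr : run.count x = run.length := List.count_eq_length.2 (fun y hy => by
          simp [hrunv y hy])
        simp [hcr]; omega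
      · have hcr : run.count x = 0 := List.count_eq_zero.2 (fun hx' => hx (hrunv x hx'))
        simp [hcr, hx, Ne.symm hx]
    have hmem : ∀ x, x ∈ v :: rest ↔ x = v ∨ x ∈ tail := by
      intro x
      rw [hrest]
      simp only [List.mem_cons, List.mem_append]
      constructor
      · rintro (h | h | h)
        · exact Or.inl h
        · exact Or.inl (hrunv x h)
        · exact Or.inr h
      · rintro (h | h)
        · exact Or.inl h
        · exact Or.inr (Or.inr h)
    have hdrop : rest.drop run.length = tail := by
      conv_lhs => rw [hrest]
      simp
    have hstep : scanRunsB (v :: rest) =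
        if run.length == 0 then false else scanRunsB tail := by
      rw [scanRunsB, ← hrundef, hdrop]
    by_cases hk : run.length = 0
    · -- empty run: the head occurs exactly once, so the answer is False on both sides
      have hrun0 : run = [] := List.eq_nil_of_length_eq_zero hk
      have hv1 : (v :: rest).count v = 1 := by
        rw [hcount v, if_pos rfl, hk, List.count_eq_zero.2 hvtail]
      have hnot : ¬ (∀ x ∈ v :: rest, 2 ≤ (v :: rest).count x) := fun h => by
        have := h v (by simp); omega
      rw [hstep, if_pos (by simp [hk]), eq_comm, decide_eq_false_iff_not]
      exact hnot
    · -- nonempty run: the head occurs ≥ 2 times; recurse on the tail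
      have htl : tail.length ≤ n := by
        have h4 : run.length + tail.length = rest.length := by
          rw [hrest]; simp
        have h5 : (v :: rest).length = rest.length + 1 := by simp
        omega
      rw [hstep, if_neg (by simpa using hk), ih tail htl hstail]
      have hk1 : 1 ≤ run.length := Nat.one_le_iff_ne_zero.2 hk
      congr 1
      apply propext
      constructor
      · intro h x hx
        rcases (hmem x).1 hx with rfl | hx'
        · rw [hcount x]; simp; omega
        · have hxv : x ≠ v := fun he => hvtail (he ▸ hx')
          rw [hcount x, if_neg hxv]
          simpa using h x hx'
      · intro h x hx
        have hxv : x ≠ v := fun he => hvtail (he ▸ hx)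
        have h6 := h x ((hmem x).2 (Or.inr hx))
        rw [hcount x, if_neg hxv] at h6
        simpa using h6

theorem scanRunsB_eq (L : List Int) (hs : L.Pairwise (· ≤ ·)) :
    scanRunsB L = decide (∀ k ∈ L, 2 ≤ L.count k) :=
  scanRunsB_eq_aux L.length L (le_refl _) hs

theorem checkB_eq (arcs : List (List Int)) :
    check_close_alt arcs = decide (∀ k ∈ endpointsB arcs, 2 ≤ (endpointsB arcs).count k) := by
  unfold check_close_alt
  set E := endpointsB arcs
  have hperm : (PySem.List.sorted E (fun x => x) false).Perm E := PySem.List.sorted_perm E _ _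
  rw [scanRunsB_eq _ (by simpa using PySem.List.sorted_pairwise E (fun x => x))]
  congr 1
  apply propext
  constructor
  · intro h k hk
    rw [← hperm.count_eq]
    exact h k (hperm.mem_iff.2 hk)
  · intro h k hk
    rw [hperm.count_eq]
    exact h k (hperm.mem_iff.1 hk)

-- ===== VERDICT (by name: the statement is the Claim_ definition above) =====
theorem check_close_spec : Claim_equal_check_close := by
  intro arcs _ hpre
  unfold Spec_check_close
  rw [checkA_eq arcs hpre, checkB_eq arcs]
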